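-- pv_equiv track=rewrite | github.com/NimaVahdat/Generalized-Tree-Algorithm | part4.py | string_maker
-- ===== SOURCE A (Python) =====
-- def make_string_ready(string):
--     string = string + ">" + string[::-1] + "$"
--     return string
--
-- def string_maker(string):
--     flag = False
--     final_string = ""
--     for s in string:
--         if s == ">":
--             final_string += ">"
--             flag = True
--         if s == "\n":
--             flag = False
--
--         if not flag and s != "\n":
--             final_string += s
--
--     final_string = make_string_ready(final_string[1:])
--     return final_string
-- ===== SOURCE B (Python) =====
-- def string_maker(string):
--     # Per-line: keep the prefix before the first '>' plus one '>' per '>' in the line.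
--     parts = [line.split('>')[0] + '>' * line.count('>') for line in string.split('\n')]
--     core = ''.join(parts)[1:]
--     return core + '>' + core[::-1] + '$'
-- ===== Notes on version B (the rewrite author's own statement) =====
-- stated objective: faster
-- what changed: Replaced the stateful per-character flag loop by a per-line decomposition: split on newlines, and for each line take the prefix before the first '>' plus one '>' per occurrence, then concatenate.
import Mathlib
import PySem

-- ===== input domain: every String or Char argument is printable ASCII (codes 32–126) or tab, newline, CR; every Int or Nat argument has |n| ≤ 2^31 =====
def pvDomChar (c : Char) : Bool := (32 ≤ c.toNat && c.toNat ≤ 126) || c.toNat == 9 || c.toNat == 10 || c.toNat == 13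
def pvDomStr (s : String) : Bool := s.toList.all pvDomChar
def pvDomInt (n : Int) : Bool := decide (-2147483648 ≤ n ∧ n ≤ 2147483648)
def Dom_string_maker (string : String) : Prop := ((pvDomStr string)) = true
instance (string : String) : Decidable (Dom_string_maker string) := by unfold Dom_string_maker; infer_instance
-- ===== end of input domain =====

-- B replaces A's stateful per-character flag loop by a per-line split/count computation (objective: simpler).

-- ===== PORT A =====
-- helper make_string_ready: string + ">" + string[::-1] + "$"   ([::-1] via PySem.List.slice?; step -1 never raises, so getD [] is exact)
def pvMakeStringReady (cs : List Char) : List Char :=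
  cs ++ ['>'] ++ ((PySem.List.slice? cs none none (-1)).getD []) ++ ['$']

-- one iteration of A's for-loop body on state (flag, final_string)
def pvStepA (st : Bool × List Char) (s : Char) : Bool × List Char :=
  let st1 := if s = '>' then (true, st.2 ++ ['>']) else st
  let st2 := if s = '\n' then (false, st1.2) else st1
  if st2.1 = false ∧ s ≠ '\n' then (st2.1, st2.2 ++ [s]) else st2

def string_maker (string : String) : String :=
  let fin := (string.toList.foldl pvStepA (false, [])).2
  String.ofList (pvMakeStringReady (PySem.List.slice fin (some 1) none))

-- ===== PORT B =====
def string_maker_alt (string : String) : String :=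
  -- [line.split('>')[0] + '>' * line.count('>') for line in string.split('\n')]
  -- splitOn never returns [], so [0] is headD []
  let parts := (PySem.Chars.splitOn string.toList ['\n']).map
    (fun line => (PySem.Chars.splitOn line ['>']).headD []
                 ++ List.replicate (PySem.Chars.count line ['>']) '>')
  let core := PySem.List.slice (PySem.Chars.join [] parts) (some 1) none  -- ''.join(parts)[1:]
  String.ofList (core ++ ['>'] ++ ((PySem.List.slice? core none none (-1)).getD []) ++ ['$'])

-- ===== PRECONDITION & SPEC =====
def Spec_string_maker (string : String) (out : String) : Prop := out = string_maker_alt string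
instance (string : String) (out : String) : Decidable (Spec_string_maker string out) := by unfold Spec_string_maker; infer_instance

-- ===== CLAIM (what is proved, stated in full; the proofs are below) =====
def Claim_equal_string_maker : Prop := ∀ (string : String), Dom_string_maker string → Spec_string_maker string (string_maker string)

-- ===== LEMMAS AND PROOFS =====

-- clean recursive model of splitting on a single character d
def pvLinesBy (d : Char) : List Char → List (List Char)
  | [] => [[]]
  | c :: cs =>
    match pvLinesBy d cs with
    | [] => [[c]]  -- unreachable
    | h :: t => if c = d then [] :: h :: t else (c :: h) :: t

theorem pvLinesBy_ne_nil (d : Char) (cs : List Char) : pvLinesBy d cs ≠ [] := by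
  cases cs with
  | nil => simp [pvLinesBy]
  | cons c cs =>
    rcases h : pvLinesBy d cs with _ | ⟨a, t⟩
    · simp [pvLinesBy, h]
    · simp only [pvLinesBy, h]
      split <;> simp

theorem pv_splitOn_go_spec (d : Char) (fuel : Nat) :
    ∀ (cs cur acc : _), cs.length < fuel →
      PySem.Chars.splitOn.go [d] fuel cs cur acc =
        acc.reverse ++ ((cur.reverse ++ (pvLinesBy d cs).headD []) :: (pvLinesBy d cs).tail) := by
  induction fuel with
  | zero => intro cs cur acc h; omega
  | succ fuel ih =>
    intro cs cur acc h
    cases cs with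
    | nil => simp [PySem.Chars.splitOn.go, pvLinesBy]
    | cons c rest =>
      have hpre : ([d].isPrefixOf (c :: rest)) = (d == c) := by
        simp [List.isPrefixOf]
      by_cases hc : c = d
      · subst hc
        rw [PySem.Chars.splitOn.go]
        simp only [hpre, BEq.rfl, if_true, List.length_cons, List.length_nil,
          List.drop_succ_cons, List.drop_zero]
        rw [ih rest [] (cur.reverse :: acc) (by simpa using Nat.lt_of_succ_lt_succ h)]
        rcases hlr : pvLinesBy c rest with _ | ⟨h1, t1⟩
        · exact absurd hlr (pvLinesBy_ne_nil c rest)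
        · simp [pvLinesBy, hlr]
      · rw [PySem.Chars.splitOn.go]
        have hdc : (d == c) = false := by simp [Ne.symm hc]
        rw [hpre, hdc, if_neg (by simp)]
        rw [ih rest (c :: cur) acc (by simpa using Nat.lt_of_succ_lt_succ h)]
        rcases hlr : pvLinesBy d rest with _ | ⟨h1, t1⟩
        · exact absurd hlr (pvLinesBy_ne_nil d rest)
        · simp [pvLinesBy, hlr, hc]

theorem pv_splitOn_single (d : Char) (cs : List Char) :
    PySem.Chars.splitOn cs [d] = pvLinesBy d cs := by
  rw [PySem.Chars.splitOn, pv_splitOn_go_spec d (cs.length + 1) cs [] [] (by omega)]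
  rcases hlr : pvLinesBy d cs with _ | ⟨h1, t1⟩
  · exact absurd hlr (pvLinesBy_ne_nil d cs)
  · simp

theorem pv_linesBy_headD (d : Char) (cs : List Char) :
    (pvLinesBy d cs).headD [] = cs.takeWhile (· ≠ d) := by
  induction cs with
  | nil => simp [pvLinesBy]
  | cons c cs ih =>
    rcases hlr : pvLinesBy d cs with _ | ⟨h1, t1⟩
    · exact absurd hlr (pvLinesBy_ne_nil d cs)
    · simp only [hlr, List.headD_cons] at ih
      by_cases hc : c = d
      · simp [pvLinesBy, hlr, hc, List.takeWhile]
      · simp [pvLinesBy, hlr, hc, List.takeWhile_cons_of_pos, ih]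

theorem pv_count_go_spec (d : Char) (fuel : Nat) :
    ∀ (cs : List Char) (acc : Nat), cs.length ≤ fuel →
      PySem.Chars.count.go [d] fuel cs acc = acc + cs.count d := by
  induction fuel with
  | zero =>
    intro cs acc h
    have : cs = [] := by cases cs <;> simp_all
    subst this; simp [PySem.Chars.count.go]
  | succ fuel ih =>
    intro cs acc h
    cases cs with
    | nil => simp [PySem.Chars.count.go]
    | cons c rest =>
      have hpre : ([d].isPrefixOf (c :: rest)) = (d == c) := by simp [List.isPrefixOf]
      by_cases hc : c = d
      · subst hc
        rw [PySem.Chars.count.go]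
        simp only [hpre, BEq.rfl]
        rw [ih _ _ (by simpa using Nat.le_of_succ_le_succ h)]
        simp
        omega
      · rw [PySem.Chars.count.go]
        have hdc : (d == c) = false := by simp [Ne.symm hc]
        rw [hpre, hdc, if_neg (by simp)]
        rw [ih _ _ (by simpa using Nat.le_of_succ_le_succ h)]
        simp [hc]

theorem pv_count_single (d : Char) (cs : List Char) :
    PySem.Chars.count cs [d] = cs.count d := by
  rw [PySem.Chars.count, if_neg (by simp)]
  simpa using pv_count_go_spec d cs.length cs 0 (le_refl _)

-- B's per-line result
def pvLineOut (l : List Char) : List Char :=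
  l.takeWhile (· ≠ '>') ++ List.replicate (l.count '>') '>'

theorem pvStepA_gt (b : Bool) (acc : List Char) : pvStepA (b, acc) '>' = (true, acc ++ ['>']) := by
  simp [pvStepA]

theorem pvStepA_nl (b : Bool) (acc : List Char) : pvStepA (b, acc) '\n' = (false, acc) := by
  simp [pvStepA]

theorem pvStepA_other_false (c : Char) (acc : List Char) (h1 : c ≠ '>') (h2 : c ≠ '\n') :
    pvStepA (false, acc) c = (false, acc ++ [c]) := by
  simp [pvStepA, h1, h2]

theorem pvStepA_other_true (c : Char) (acc : List Char) (h1 : c ≠ '>') (h2 : c ≠ '\n') :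
    pvStepA (true, acc) c = (true, acc) := by
  simp [pvStepA, h1, h2]

-- the main loop invariant: from flag=false the loop produces the per-line outputs;
-- from flag=true it keeps only the '>'s of the current line and then continues
theorem pv_loop_spec (cs : List Char) :
    (∀ acc, (cs.foldl pvStepA (false, acc)).2
        = acc ++ (((pvLinesBy '\n' cs).map pvLineOut).flatten))
    ∧ (∀ acc, (cs.foldl pvStepA (true, acc)).2
        = acc ++ List.replicate (((pvLinesBy '\n' cs).headD []).count '>') '>'
              ++ (((pvLinesBy '\n' cs).tail).map pvLineOut).flatten) := by
  induction cs with
  | nil => simp [pvLinesBy, pvLineOut]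
  | cons c cs ih =>
    obtain ⟨ihF, ihT⟩ := ih
    rcases hlr : pvLinesBy '\n' cs with _ | ⟨h1, t1⟩
    · exact absurd hlr (pvLinesBy_ne_nil _ cs)
    · simp only [hlr] at ihF ihT
      constructor <;> intro acc
      · -- flag = false
        by_cases hgt : c = '>'
        · subst hgt
          rw [List.foldl_cons, pvStepA_gt, ihT (acc ++ ['>'])]
          simp [pvLinesBy, hlr, pvLineOut, List.takeWhile, List.replicate_succ]
        · by_cases hnl : c = '\n'
          · subst hnl
            rw [List.foldl_cons, pvStepA_nl, ihF acc]
            simp [pvLinesBy, hlr, pvLineOut]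
          · rw [List.foldl_cons, pvStepA_other_false c acc hgt hnl, ihF (acc ++ [c])]
            simp [pvLinesBy, hlr, hnl, pvLineOut, List.takeWhile, hgt]
      · -- flag = true
        by_cases hgt : c = '>'
        · subst hgt
          rw [List.foldl_cons, pvStepA_gt, ihT (acc ++ ['>'])]
          simp [pvLinesBy, hlr, List.replicate_succ]
        · by_cases hnl : c = '\n'
          · subst hnl
            rw [List.foldl_cons, pvStepA_nl, ihF acc]
            simp [pvLinesBy, hlr]
          · rw [List.foldl_cons, pvStepA_other_true c acc hgt hnl, ihT acc]
            simp [pvLinesBy, hlr, hnl, hgt]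

theorem pv_join_nil (parts : List (List Char)) :
    PySem.Chars.join [] parts = parts.flatten := by
  rw [PySem.Chars.join]
  induction parts with
  | nil => simp [List.intercalate]
  | cons p ps ih =>
    cases ps with
    | nil => simp [List.intercalate]
    | cons q qs =>
      simp only [List.intercalate] at ih ⊢
      simp [List.intersperse] at ih ⊢
      exact ih

-- ===== VERDICT (by name: the statement is the Claim_ definition above) =====
theorem string_maker_spec : Claim_equal_string_maker := by
  intro string _
  unfold Spec_string_maker string_maker string_maker_alt
  have hloop := (pv_loop_spec string.toList).1 []
  simp only [List.nil_append] at hloop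
  simp only [hloop, pv_splitOn_single, pv_count_single, pv_linesBy_headD, pv_join_nil,
    pvMakeStringReady]
  rfl
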